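-- pv_equiv track=rewrite | github.com/Nasru105/QueueBot | app/utils/utils.py | parse_queue_args
-- ===== SOURCE A (Python) =====
-- from typing import Any, Dict, List, Optional, Tuple
--
-- def parse_queue_args(args: list[str], queues: dict[str, dict[str, Any]]) -> tuple[str, str, list[str]]:
--     """
--     Парсит аргументы команды.
--     Ищет САМОЕ ДЛИННОЕ совпадение имени очереди.
--     """
--     if not args:
--         return None, []
--
--     best_match = None
--     best_i = 0
--     queue_names = {queue["name"]: queue["id"] for queue in queues.values()}
--     for i in range(1, len(args) + 1):
--         candidate = " ".join(args[:i])
--         if candidate in queue_names: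
--             best_match = candidate
--             best_i = i
--
--     if best_match:
--         return queue_names[best_match], best_match, args[best_i:]
--     return None, None, []
-- ===== SOURCE B (Python) =====
-- def parse_queue_args(args, queues):
--     """
--     Парсит аргументы команды.
--     Ищет САМОЕ ДЛИННОЕ совпадение имени очереди.
--     """
--     if not args:
--         return None, []
--
--     # index every space-joined prefix of args by its word count, once
--     prefixes = {}
--     acc = ""
--     for i, word in enumerate(args):
--         acc = word if i == 0 else acc + " " + word
--         prefixes[acc] = i + 1
--
--     # single pass over the queues: keep the deepest match (later queue wins ties)
--     best_id = best_name = None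
--     best_i = 0
--     for queue in queues.values():
--         i = prefixes.get(queue["name"])
--         if i is not None and i >= best_i:
--             best_id, best_name, best_i = queue["id"], queue["name"], i
--
--     if best_i:
--         return best_id, best_name, args[best_i:]
--     return None, None, []
-- ===== Notes on version B (the rewrite author's own statement) =====
-- stated objective: alternative
-- what changed: Instead of scanning every prefix length and testing membership in a dict of queue names, B builds an index of all space-joined prefixes of args once (prefix -> word count) and then makes a single pass over the queues themselves, looking each queue name up in that index and keeping the deepest match; the queue-names dict of A is never built.
-- intended difference: When args[0] is the empty string, some queue is named '' and no longer prefix matches a queue name, A's 'if best_match:' treats the matched empty name as falsy and returns (None, None, []); B returns the match (its id, '', args[1:]), the intended longest-prefix result. — e.g. on parse_queue_args([""], [("q", [("name", ""), ("id", "7")])]): A returns (none, none, []), B returns (some "7", some "", [])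
-- outside the precondition, e.g. on parse_queue_args([], {}): A returns (None, []), B returns (None, [])
import Mathlib
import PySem

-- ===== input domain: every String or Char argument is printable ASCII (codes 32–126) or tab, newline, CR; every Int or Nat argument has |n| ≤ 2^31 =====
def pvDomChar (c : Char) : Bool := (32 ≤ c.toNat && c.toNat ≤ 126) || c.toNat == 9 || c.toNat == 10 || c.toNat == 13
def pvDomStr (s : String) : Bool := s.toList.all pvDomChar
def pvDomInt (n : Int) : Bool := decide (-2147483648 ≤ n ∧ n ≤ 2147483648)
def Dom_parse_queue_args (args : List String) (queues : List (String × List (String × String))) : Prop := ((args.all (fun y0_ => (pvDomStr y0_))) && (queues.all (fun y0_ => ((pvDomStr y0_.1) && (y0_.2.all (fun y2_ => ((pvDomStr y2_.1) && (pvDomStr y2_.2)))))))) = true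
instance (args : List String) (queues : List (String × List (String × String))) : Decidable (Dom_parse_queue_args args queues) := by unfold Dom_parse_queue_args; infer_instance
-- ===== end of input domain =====

-- B inverts A's traversal: instead of scanning every prefix length and testing membership in a
-- dict of queue names, B indexes all space-joined prefixes of args once (prefix -> word count)
-- and makes a single pass over the queues, keeping the deepest match (objective: alternative);
-- on the corner where the longest match is an empty-string queue name, A's truthiness test drops
-- the match and B returns it (stated as D_ below).

-- ===== PORT A =====
-- the dict comprehension {queue["name"]: queue["id"] for queue in queues.values()}.
-- queue["name"] / queue["id"] raise KeyError when the key is absent; Pre_ excludes those inputs,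
-- so the `.getD ""` defaults are never reached on admitted inputs.
def pvQueueNames (queues : List (String × List (String × String))) : PySem.Dict String String :=
  (PySem.Dict.ofList queues).values.foldl
    (fun d q => d.insert ((PySem.Dict.get? (PySem.Dict.ofList q) "name").getD "")
                         ((PySem.Dict.get? (PySem.Dict.ofList q) "id").getD ""))
    PySem.Dict.empty

-- A's loop: for i in range(1, len(args) + 1): candidate = " ".join(args[:i]); if candidate in
-- queue_names: best_match, best_i = candidate, i  — a fold carrying (best_match, best_i)
def pvScanAsc (queue_names : PySem.Dict String String) (args : List String) (n : Nat) :
    Option String × Int :=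
  (PySem.List.pyRange 1 ((n : Int) + 1) 1).foldl
    (fun st i =>
      let candidate := PySem.Str.join " " (PySem.List.slice args none (some i))
      if queue_names.contains candidate then (some candidate, i) else st)
    (none, 0)

def parse_queue_args (args : List String) (queues : List (String × List (String × String))) :
    Option String × Option String × List String :=
  -- 'if not args: return None, []' returns a 2-tuple, which is outside the declared triple type;
  -- Pre_ excludes args = [], so the value used here is never compared
  if args = [] then (none, none, []) else
  let queue_names := pvQueueNames queues
  let best := pvScanAsc queue_names args args.length
  -- 'if best_match:' — falsy both for None and for the empty string
  match best.1 with
  | some bm =>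
      if bm = "" then (none, none, [])
      else (queue_names.get? bm, some bm, PySem.List.slice args (some best.2) none)
      -- queue_names[best_match]: membership was recorded by the loop, so get? is some here
  | none => (none, none, [])

-- ===== PORT B =====
-- Python string concatenation a + b, ported by hand (exact: concatenation of the character lists)
def pvStrCat (a b : String) : String := String.ofList (a.toList ++ b.toList)

-- B's first loop: for i, word in enumerate(args): acc = word if i == 0 else acc + " " + word;
-- prefixes[acc] = i + 1  — a fold carrying (acc, prefixes)
def pvPrefixes (args : List String) : String × PySem.Dict String Int :=
  (PySem.List.enumerate args).foldl
    (fun st p =>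
      let acc := if p.1 == 0 then p.2 else pvStrCat (pvStrCat st.1 " ") p.2
      (acc, st.2.insert acc (p.1 + 1)))
    ("", PySem.Dict.empty)

-- B's second loop: for queue in queues.values(): i = prefixes.get(queue["name"]);
-- if i is not None and i >= best_i: best_id, best_name, best_i = queue["id"], queue["name"], i
-- — a fold carrying (best_id, best_name, best_i); queue["name"]/["id"] as in port A.
def pvBestScan (prefixes : PySem.Dict String Int)
    (queues : List (String × List (String × String))) :
    Option String × Option String × Int :=
  (PySem.Dict.ofList queues).values.foldl
    (fun st q =>
      match prefixes.get? ((PySem.Dict.get? (PySem.Dict.ofList q) "name").getD "") with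
      | some i =>
          if st.2.2 ≤ i then
            (some ((PySem.Dict.get? (PySem.Dict.ofList q) "id").getD ""),
             some ((PySem.Dict.get? (PySem.Dict.ofList q) "name").getD ""), i)
          else st
      | none => st)
    (none, none, 0)

def parse_queue_args_alt (args : List String) (queues : List (String × List (String × String))) :
    Option String × Option String × List String :=
  if args = [] then (none, none, []) else
  let prefixes := (pvPrefixes args).2
  let best := pvBestScan prefixes queues
  -- 'if best_i:' — an int is truthy iff nonzero
  if best.2.2 ≠ 0 then (best.1, best.2.1, PySem.List.slice args (some best.2.2) none)
  else (none, none, [])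

-- ===== PRECONDITION & SPEC =====
-- Pre_ excludes args = [] (A returns the 2-tuple (None, []) there, not a value of the declared
-- 3-tuple type) and queue dicts missing a "name" or "id" key (A raises KeyError there).
def Pre_parse_queue_args (args : List String) (queues : List (String × List (String × String))) : Prop :=
  args ≠ [] ∧
  ∀ q ∈ (PySem.Dict.ofList queues).values,
    (PySem.Dict.ofList q).contains "name" = true ∧ (PySem.Dict.ofList q).contains "id" = true
instance (args : List String) (queues : List (String × List (String × String))) : Decidable (Pre_parse_queue_args args queues) := by unfold Pre_parse_queue_args; infer_instance

def pvWitness_parse_queue_args : List String × (List (String × List (String × String))) :=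
  (["a"], [("q", [("name", "a"), ("id", "1")])])

-- does some queue (as Python sees queues, i.e. after dict key collapsing) carry name c?
def pvHasName (queues : List (String × List (String × String))) (c : String) : Bool :=
  (PySem.Dict.ofList queues).values.any
    (fun q => PySem.Dict.get? (PySem.Dict.ofList q) "name" == some c)

-- When args[0] is the empty string, some queue is named "" and no longer prefix matches a queue
-- name, A's 'if best_match:' treats the matched empty name as falsy and returns (None, None, []);
-- B returns the match (its id, "", args[1:]), the intended longest-prefix result.
def D_parse_queue_args (args : List String) (queues : List (String × List (String × String))) : Prop :=
  args.head? = some "" ∧ pvHasName queues "" = true ∧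
  ∀ i, i < args.length + 1 → 2 ≤ i →
    pvHasName queues (PySem.Str.join " " (args.take i)) = false
instance (args : List String) (queues : List (String × List (String × String))) : Decidable (D_parse_queue_args args queues) := by unfold D_parse_queue_args; infer_instance

def Spec_parse_queue_args (args : List String) (queues : List (String × List (String × String))) (out : Option String × Option String × List String) : Prop := ¬ D_parse_queue_args args queues → out = parse_queue_args_alt args queues
instance (args : List String) (queues : List (String × List (String × String))) (out : Option String × Option String × List String) : Decidable (Spec_parse_queue_args args queues out) := by unfold Spec_parse_queue_args; infer_instance

def pvDiffWitness_parse_queue_args : List String × (List (String × List (String × String))) :=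
  ([""], [("q", [("name", ""), ("id", "7")])])
def pvDiffWitnessOut_parse_queue_args : (Option String × Option String × List String) × (Option String × Option String × List String) :=
  ((none, none, []), (some "7", some "", []))

-- ===== CLAIM (what is proved, stated in full; the proofs are below) =====
def Claim_unchanged_parse_queue_args : Prop := ∀ (args : List String) (queues : List (String × List (String × String))), Dom_parse_queue_args args queues → Pre_parse_queue_args args queues → Spec_parse_queue_args args queues (parse_queue_args args queues)
def Claim_changed_parse_queue_args : Prop := Dom_parse_queue_args (pvDiffWitness_parse_queue_args.1) (pvDiffWitness_parse_queue_args.2) ∧ Pre_parse_queue_args (pvDiffWitness_parse_queue_args.1) (pvDiffWitness_parse_queue_args.2) ∧ D_parse_queue_args (pvDiffWitness_parse_queue_args.1) (pvDiffWitness_parse_queue_args.2) ∧ parse_queue_args (pvDiffWitness_parse_queue_args.1) (pvDiffWitness_parse_queue_args.2) = pvDiffWitnessOut_parse_queue_args.1 ∧ parse_queue_args_alt (pvDiffWitness_parse_queue_args.1) (pvDiffWitness_parse_queue_args.2) = pvDiffWitnessOut_parse_queue_args.2 ∧ pvDiffWitnessOut_parse_queue_args.1 ≠ pvDiffWitnessO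ut_parse_queue_args.2
def Claim_exact_parse_queue_args : Prop := ∀ (args : List String) (queues : List (String × List (String × String))), Dom_parse_queue_args args queues → Pre_parse_queue_args args queues → D_parse_queue_args args queues → parse_queue_args args queues ≠ parse_queue_args_alt args queues

-- ===== LEMMAS AND PROOFS =====

-- the candidate string for prefix length i
def pvCand (args : List String) (i : Nat) : String := PySem.Str.join " " (args.take i)

-- the largest j ∈ [1, n] satisfying p (none if there is no such j)
def pvMaxIdx (n : Nat) (p : Nat → Bool) : Option Nat :=
  (((List.range n).map (· + 1)).reverse).find? p

-- A's loop keeps the LAST i whose candidate is a queue name: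
def pvFindBest (N : PySem.Dict String String) (args : List String) (n : Nat) : Option Nat :=
  pvMaxIdx n (fun j => N.contains (pvCand args j))

lemma pvMaxIdx_zero (p : Nat → Bool) : pvMaxIdx 0 p = none := rfl

lemma pvMaxIdx_succ (p : Nat → Bool) (n : Nat) :
    pvMaxIdx (n + 1) p = if p (n + 1) then some (n + 1) else pvMaxIdx n p := by
  simp [pvMaxIdx, List.range_succ, List.find?_cons]
  cases h : p (n + 1) <;> simp

lemma pvMaxIdx_some (p : Nat → Bool) (n j : Nat) (h : pvMaxIdx n p = some j) :
    1 ≤ j ∧ j ≤ n ∧ p j = true := by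
  have hmem := List.mem_of_find?_eq_some h
  have hp := List.find?_some h
  simp only [List.mem_reverse, List.mem_map, List.mem_range] at hmem
  obtain ⟨a, ha, rfl⟩ := hmem
  exact ⟨by omega, by omega, hp⟩

lemma pvMaxIdx_max (p : Nat → Bool) (n j : Nat) (h : pvMaxIdx n p = some j) :
    ∀ m, j < m → m ≤ n → p m = false := by
  intro m hjm hmn
  rcases List.find?_eq_some_iff_append.mp h with ⟨hpj, as, bs, heq, has⟩
  have hpair : (((List.range n).map (· + 1)).reverse).Pairwise (fun a b => b < a) := by
    rw [List.pairwise_reverse]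
    exact (List.pairwise_lt_range).map _ (fun {a b} hab => by omega)
  have hm : m ∈ ((List.range n).map (· + 1)).reverse := by
    simp [List.mem_range]
    exact ⟨m - 1, by omega, by omega⟩
  rw [heq] at hm hpair
  rcases List.mem_append.mp hm with h1 | h2
  · simpa using has m h1
  · rcases List.pairwise_append.mp hpair with ⟨_, hpj2, _⟩
    rcases List.mem_cons.mp h2 with rfl | h3
    · omega
    · have := (List.pairwise_cons.mp hpj2).1 m h3
      omega

lemma pvMaxIdx_none (p : Nat → Bool) (n m : Nat) (h : pvMaxIdx n p = none)
    (h1 : 1 ≤ m) (h2 : m ≤ n) : p m = false := by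
  have := List.find?_eq_none.mp h m (by
    simp [List.mem_range]
    exact ⟨m - 1, by omega, by omega⟩)
  simpa using this

lemma pvMaxIdx_stable (p : Nat → Bool) (k n : Nat)
    (hkn : k ≤ n) (hhigh : ∀ m, k < m → m ≤ n → p m = false) :
    pvMaxIdx n p = pvMaxIdx k p := by
  induction n with
  | zero => have : k = 0 := by omega
            simp [this]
  | succ n ih =>
      rcases Nat.lt_or_ge k (n + 1) with hlt | hge
      · rw [pvMaxIdx_succ, hhigh (n + 1) (by omega) (by omega)]
        simp
        exact ih (by omega) (fun m hm1 hm2 => hhigh m hm1 (by omega))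
      · have : k = n + 1 := by omega
        simp [this]

lemma pvMaxIdx_congr (p q : Nat → Bool) (n : Nat) (h : ∀ m, p m = q m) :
    pvMaxIdx n p = pvMaxIdx n q := by
  have : p = q := funext h
  rw [this]

-- max of two optional indices (none = no index)
def pvOmax : Option Nat → Option Nat → Option Nat
  | none, b => b
  | a, none => a
  | some x, some y => some (max x y)

lemma pvMaxIdx_or (p q : Nat → Bool) (n : Nat) :
    pvMaxIdx n (fun i => p i || q i) = pvOmax (pvMaxIdx n p) (pvMaxIdx n q) := by
  induction n with
  | zero => simp [pvMaxIdx_zero, pvOmax]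
  | succ n ih =>
      rw [pvMaxIdx_succ, pvMaxIdx_succ, pvMaxIdx_succ, ih]
      cases hp : p (n + 1) with
      | true =>
          simp only [Bool.true_or, if_true]
          cases hq : q (n + 1) with
          | true => simp [pvOmax]
          | false =>
              cases hmq : pvMaxIdx n q with
              | none => simp [pvOmax]
              | some y =>
                  have hy := (pvMaxIdx_some q n y hmq).2.1
                  simp [pvOmax]
                  omega
      | false =>
          simp only [Bool.false_or]
          cases hq : q (n + 1) with
          | true =>
              cases hmp : pvMaxIdx n p with
              | none => simp [pvOmax]
              | some x =>
                  have hx := (pvMaxIdx_some p n x hmp).2.1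
                  simp [pvOmax]
                  omega
          | false => simp

lemma pvScanAsc_eq (N : PySem.Dict String String) (args : List String) (n : Nat) :
    pvScanAsc N args n =
      match pvFindBest N args n with
      | none => (none, 0)
      | some j => (some (pvCand args j), (j : Int)) := by
  induction n with
  | zero =>
      simp [pvScanAsc, pvFindBest, pvMaxIdx_zero,
        PySem.List.pyRange_one_eq_nil (le_refl (1 : Int))]
  | succ n ih =>
      have hsplit : PySem.List.pyRange 1 (((n + 1 : Nat) : Int) + 1) 1 =
          PySem.List.pyRange 1 ((n : Int) + 1) 1 ++ [((n : Int) + 1)] := by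
        have h := PySem.List.pyRange_one_succ_right (a := 1) (b := (n : Int) + 1) (by omega)
        push_cast
        convert h using 2
      unfold pvScanAsc
      rw [hsplit, List.foldl_append]
      have hbody : pvScanAsc N args n =
          (PySem.List.pyRange 1 ((n : Int) + 1) 1).foldl
            (fun st i =>
              let candidate := PySem.Str.join " " (PySem.List.slice args none (some i))
              if N.contains candidate then (some candidate, i) else st)
            (none, 0) := rfl
      rw [← hbody, ih]
      unfold pvFindBest
      rw [pvMaxIdx_succ]
      have hsl : PySem.List.slice args none (some ((n : Int) + 1)) = args.take (n + 1) := by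
        have : ((n : Int) + 1) = ((n + 1 : Nat) : Int) := by push_cast; ring
        rw [this, PySem.List.slice_to_natCast]
      cases hc : N.contains (pvCand args (n + 1)) with
      | true =>
          cases hfb : pvMaxIdx n (fun j => N.contains (pvCand args j)) <;>
            simp [hsl, pvCand] at hc ⊢ <;> simp [hc]
      | false =>
          cases hfb : pvMaxIdx n (fun j => N.contains (pvCand args j)) <;>
            simp [hsl, pvCand] at hc ⊢ <;> simp [hc]

lemma pvCand_one (a : String) (t : List String) : pvCand (a :: t) 1 = a := by
  simp [pvCand, PySem.Str.join, PySem.Chars.join, List.intercalate]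

lemma pvCand_ne_empty (args : List String) (i : Nat) (h2 : 2 ≤ i) (hlen : i ≤ args.length) :
    pvCand args i ≠ "" := by
  intro hcontra
  have hl : (args.take i).length = i := by simp; omega
  rcases htk : args.take i with _ | ⟨x, tl⟩
  · rw [htk] at hl; simp at hl; omega
  · rcases tl with _ | ⟨y, rest⟩
    · rw [htk] at hl; simp at hl; omega
    · have hthis : (pvCand args i).toList = ("" : String).toList := by rw [hcontra]
      rw [pvCand, htk] at hthis
      simp [PySem.Str.join, PySem.Chars.join, List.intercalate,
        String.toList_ofList] at hthis

-- generic: membership in a fold of inserts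
lemma contains_foldl_insert (l : List (List (String × String)))
    (k v : List (String × String) → String) (d : PySem.Dict String String) (c : String) :
    (l.foldl (fun d a => d.insert (k a) (v a)) d).contains c =
      (d.contains c || l.any (fun a => c == k a)) := by
  induction l generalizing d with
  | nil => simp
  | cons hd tl ih =>
      simp only [List.foldl_cons, List.any_cons, ih, PySem.Dict.contains_insert]
      cases h : (c == k hd) <;> simp

-- generic: lookup in a fold of inserts = value of the LAST element carrying the key
lemma get?_foldl_insert {ν : Type} (l : List (List (String × String)))
    (k : List (String × String) → String) (v : List (String × String) → ν)
    (d : PySem.Dict String ν) (c : String) :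
    (l.foldl (fun d a => d.insert (k a) (v a)) d).get? c =
      match l.reverse.find? (fun a => c == k a) with
      | some a => some (v a)
      | none => d.get? c := by
  induction l generalizing d with
  | nil => simp
  | cons hd tl ih =>
      simp only [List.foldl_cons, List.reverse_cons, ih, List.find?_append]
      cases hf : tl.reverse.find? (fun a => c == k a) with
      | some a => simp
      | none =>
          simp only [Option.none_or]
          rw [PySem.Dict.get?_insert]
          cases hc : (c == k hd) with
          | true => simp at hc; simp [hc]
          | false => simp at hc; simp [hc]

lemma contains_pvQueueNames (queues : List (String × List (String × String))) (c : String)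
    (hpre : ∀ q ∈ (PySem.Dict.ofList queues).values,
      (PySem.Dict.ofList q).contains "name" = true ∧ (PySem.Dict.ofList q).contains "id" = true) :
    (pvQueueNames queues).contains c = pvHasName queues c := by
  unfold pvQueueNames pvHasName
  rw [contains_foldl_insert]
  simp only [PySem.Dict.contains_empty, Bool.false_or]
  cases hres : (PySem.Dict.ofList queues).values.any
      (fun q => PySem.Dict.get? (PySem.Dict.ofList q) "name" == some c) with
  | true =>
      rcases List.any_eq_true.mp hres with ⟨q, hq, hqc⟩
      apply List.any_eq_true.mpr
      refine ⟨q, hq, ?_⟩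
      simp at hqc ⊢
      simp [hqc]
  | false =>
      apply List.any_eq_false.mpr
      intro q hq
      have hnone := List.any_eq_false.mp hres q hq
      have hsome : ((PySem.Dict.ofList q).get? "name").isSome := by
        rw [← PySem.Dict.contains_eq_isSome_get?]
        exact (hpre q hq).1
      rcases Option.isSome_iff_exists.mp hsome with ⟨nm, hnm⟩
      simp [hnm] at hnone ⊢
      exact fun hcc => hnone hcc.symm

-- ----- B-side: the prefix index -----

-- appending a word extends the join by " " ++ word (when the prefix is nonempty)
lemma chars_join_append_singleton (sep : List Char) (l : List (List Char)) (x : List Char)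
    (h : l ≠ []) :
    PySem.Chars.join sep (l ++ [x]) = PySem.Chars.join sep l ++ sep ++ x := by
  induction l with
  | nil => exact absurd rfl h
  | cons a tl ih =>
      rcases tl with _ | ⟨b, tl'⟩
      · simp [PySem.Chars.join_cons_cons, PySem.Chars.join_singleton]
      · simp only [List.cons_append] at ih ⊢
        rw [PySem.Chars.join_cons_cons, ih (by simp), PySem.Chars.join_cons_cons]
        simp

lemma pvCand_succ (args : List String) (k : Nat) (w : String) (hk : 1 ≤ k)
    (hget : args[k]? = some w) :
    pvCand args (k + 1) = pvStrCat (pvStrCat (pvCand args k) " ") w := by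
  have hklen : k < args.length := by
    rcases List.getElem?_eq_some_iff.mp hget with ⟨h, _⟩; exact h
  have htake : args.take (k + 1) = args.take k ++ [w] := by
    rw [List.take_add_one, hget]; rfl
  have hne : (args.take k).map String.toList ≠ [] := by
    simp only [ne_eq, List.map_eq_nil_iff, List.take_eq_nil_iff, not_or]
    refine ⟨by omega, ?_⟩
    intro h
    rw [h] at hklen
    simp at hklen
  have h1 : (pvCand args (k + 1)).toList =
      (pvStrCat (pvStrCat (pvCand args k) " ") w).toList := by
    simp only [pvCand, PySem.Str.toList_join, htake, List.map_append, List.map_cons,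
      List.map_nil, pvStrCat, String.toList_ofList]
    rw [chars_join_append_singleton _ _ _ hne]
  calc pvCand args (k + 1) = String.ofList (pvCand args (k + 1)).toList :=
        String.ofList_toList.symm
    _ = String.ofList (pvStrCat (pvStrCat (pvCand args k) " ") w).toList := by rw [h1]
    _ = pvStrCat (pvStrCat (pvCand args k) " ") w := String.ofList_toList

-- the last index in [1, n] whose candidate equals c
def pvLastIdx (args : List String) (n : Nat) (c : String) : Option Nat :=
  pvMaxIdx n (fun i => pvCand args i == c)

-- the dict the first loop builds, abstractly
def pvDn (args : List String) (n : Nat) : PySem.Dict String Int :=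
  (List.range n).foldl (fun d k => d.insert (pvCand args (k + 1)) ((k : Int) + 1))
    PySem.Dict.empty

lemma pvCand_append (xs ys : List String) (i : Nat) (h : i ≤ xs.length) :
    pvCand (xs ++ ys) i = pvCand xs i := by
  unfold pvCand
  rw [List.take_append_of_le_length h]

lemma pvDn_congr (a1 a2 : List String) (n : Nat)
    (h : ∀ i, 1 ≤ i → i ≤ n → pvCand a1 i = pvCand a2 i) :
    pvDn a1 n = pvDn a2 n := by
  induction n with
  | zero => rfl
  | succ n ih =>
      simp only [pvDn, List.range_succ, List.foldl_append, List.foldl_cons, List.foldl_nil]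
      rw [show (List.range n).foldl
            (fun d k => d.insert (pvCand a1 (k + 1)) ((k : Int) + 1)) PySem.Dict.empty
          = pvDn a1 n from rfl,
        show (List.range n).foldl
            (fun d k => d.insert (pvCand a2 (k + 1)) ((k : Int) + 1)) PySem.Dict.empty
          = pvDn a2 n from rfl,
        ih (fun i h1 h2 => h i h1 (by omega)), h (n + 1) (by omega) (by omega)]

lemma pvPrefixes_eq (args : List String) :
    pvPrefixes args =
      ((if args = [] then "" else pvCand args args.length), pvDn args args.length) := by
  induction args using List.reverseRecOn with
  | nil => rfl
  | append_singleton xs x ih =>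
      have hstep : pvPrefixes (xs ++ [x]) =
          (fun st (p : Int × String) =>
            let acc := if p.1 == 0 then p.2 else pvStrCat (pvStrCat st.1 " ") p.2
            (acc, st.2.insert acc (p.1 + 1)))
            (pvPrefixes xs) ((xs.length : Int), x) := by
        unfold pvPrefixes
        rw [PySem.List.enumerate_append, List.foldl_append, PySem.List.enumerate_cons,
          PySem.List.enumerate_nil]
        simp
      rw [hstep, ih]
      rcases hxs : xs with _ | ⟨a, t⟩
      · simp [pvCand_one, pvDn, List.range_succ]
      · rw [← hxs]
        have hne : xs ≠ [] := by rw [hxs]; simp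
        have hlen : 1 ≤ xs.length := by
          rw [hxs]; simp
        have hz : ((xs.length : Int) == 0) = false := by
          simp; omega
        have hcasucc : pvCand (xs ++ [x]) (xs.length + 1) =
            pvStrCat (pvStrCat (pvCand xs xs.length) " ") x := by
          rw [pvCand_succ (xs ++ [x]) xs.length x hlen (by simp),
            pvCand_append xs [x] xs.length le_rfl]
        have hdn : pvDn (xs ++ [x]) (xs.length + 1) =
            (pvDn xs xs.length).insert (pvCand (xs ++ [x]) (xs.length + 1))
              ((xs.length : Int) + 1) := by
          simp only [pvDn, List.range_succ, List.foldl_append, List.foldl_cons, List.foldl_nil]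
          rw [show (List.range xs.length).foldl
              (fun d k => d.insert (pvCand (xs ++ [x]) (k + 1)) ((k : Int) + 1))
                PySem.Dict.empty = pvDn (xs ++ [x]) xs.length from rfl,
            pvDn_congr (xs ++ [x]) xs xs.length
              (fun i _ h2 => pvCand_append xs [x] i h2)]
          rfl
        simp [hne, hz, hdn, ← hcasucc]

lemma pvDn_get? (args : List String) (n : Nat) (c : String) :
    (pvDn args n).get? c = (pvLastIdx args n c).map (fun i => (i : Int)) := by
  induction n with
  | zero => simp [pvDn, pvLastIdx, pvMaxIdx_zero]
  | succ n ih =>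
      have hsplit : pvDn args (n + 1) =
          (pvDn args n).insert (pvCand args (n + 1)) ((n : Int) + 1) := by
        simp [pvDn, List.range_succ]
      rw [hsplit, PySem.Dict.get?_insert]
      unfold pvLastIdx
      rw [pvMaxIdx_succ]
      by_cases hc : c = pvCand args (n + 1)
      · simp [hc]
      · have : (pvCand args (n + 1) == c) = false := by
          simp
          exact fun h => hc h.symm
        simp [hc, this, ih, pvLastIdx]

-- ----- B-side: the queues scan -----

def pvNameOf (q : List (String × String)) : String :=
  ((PySem.Dict.ofList q).get? "name").getD ""
def pvIdOf (q : List (String × String)) : String :=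
  ((PySem.Dict.ofList q).get? "id").getD ""

-- the scan over an arbitrary list of queue dicts computes the deepest (last on ties) match
lemma pvBestScan_char (args : List String) (P : PySem.Dict String Int)
    (hP : ∀ c, P.get? c = (pvLastIdx args args.length c).map (fun i => (i : Int)))
    (l : List (List (String × String))) :
    l.foldl
      (fun st q =>
        match P.get? (pvNameOf q) with
        | some i =>
            if st.2.2 ≤ i then (some (pvIdOf q), some (pvNameOf q), i) else st
        | none => st)
      (none, none, 0) =
      match pvMaxIdx args.length
          (fun i => l.any (fun q => pvNameOf q == pvCand args i)) with
      | none => (none, none, 0)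
      | some j =>
          ((l.reverse.find? (fun q => pvNameOf q == pvCand args j)).map pvIdOf,
           some (pvCand args j), (j : Int)) := by
  induction l using List.reverseRecOn with
  | nil =>
      have h0 : pvMaxIdx args.length (fun _ : Nat => false) = none :=
        List.find?_eq_none.mpr (fun x _ => by simp)
      simp [h0]
  | append_singleton l q ih =>
      rw [List.foldl_append, List.foldl_cons, List.foldl_nil, ih]
      have hK : P.get? (pvNameOf q) =
          (pvMaxIdx args.length (fun i => pvNameOf q == pvCand args i)).map
            (fun i => (i : Int)) := by
        rw [hP (pvNameOf q)]
        unfold pvLastIdx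
        rw [pvMaxIdx_congr (fun i => pvCand args i == pvNameOf q)
          (fun i => pvNameOf q == pvCand args i) args.length
          (fun m => Bool.beq_comm)]
      have hor : pvMaxIdx args.length
          (fun i => (l ++ [q]).any (fun r => pvNameOf r == pvCand args i)) =
          pvOmax (pvMaxIdx args.length (fun i => l.any (fun r => pvNameOf r == pvCand args i)))
            (pvMaxIdx args.length (fun i => pvNameOf q == pvCand args i)) := by
        rw [← pvMaxIdx_or]
        exact pvMaxIdx_congr _ _ _ (fun m => by simp)
      cases hKv : pvMaxIdx args.length (fun i => pvNameOf q == pvCand args i) with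
      | none =>
          rw [hKv] at hK
          simp at hK
          rw [hor, hKv]
          cases hJ : pvMaxIdx args.length
              (fun i => l.any (fun r => pvNameOf r == pvCand args i)) with
          | none => simp [hK, pvOmax]
          | some j =>
              obtain ⟨hj1, hj2, _⟩ := pvMaxIdx_some _ _ _ hJ
              have hqj : (pvNameOf q == pvCand args j) = false :=
                pvMaxIdx_none _ _ _ hKv hj1 hj2
              simp [hK, pvOmax, hqj]
      | some i =>
          rw [hKv] at hK
          simp at hK
          obtain ⟨hi1, hi2, hqi⟩ := pvMaxIdx_some _ _ _ hKv
          have hqi' : pvNameOf q = pvCand args i := by simpa using hqi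
          rw [hor, hKv]
          cases hJ : pvMaxIdx args.length
              (fun i => l.any (fun r => pvNameOf r == pvCand args i)) with
          | none =>
              simp only [hK]
              simp [pvOmax, hqi']
          | some j =>
              obtain ⟨hj1, hj2, _⟩ := pvMaxIdx_some _ _ _ hJ
              by_cases hji : j ≤ i
              · have hmax : max j i = i := Nat.max_eq_right hji
                have hle : ((j : Int)) ≤ (i : Int) := by omega
                simp only [hK]
                rw [if_pos hle]
                simp [pvOmax, hmax, hqi']
              · have hmax : max j i = j := Nat.max_eq_left (by omega)
                have hqj : (pvNameOf q == pvCand args j) = false :=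
                  pvMaxIdx_max _ _ _ hKv j (by omega) hj2
                have hle : ¬ ((j : Int)) ≤ (i : Int) := by omega
                simp only [hK]
                rw [if_neg hle]
                simp [pvOmax, hmax, hqj]

lemma any_congr_mem {α : Type} (l : List α) (f g : α → Bool) (h : ∀ x ∈ l, f x = g x) :
    l.any f = l.any g := by
  induction l with
  | nil => rfl
  | cons a t ih =>
      simp only [List.any_cons, h a (by simp), ih (fun x hx => h x (by simp [hx]))]

lemma get?_pvQueueNames (queues : List (String × List (String × String))) (c : String) :
    (pvQueueNames queues).get? c =
      ((PySem.Dict.ofList queues).values.reverse.find?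
        (fun q => pvNameOf q == c)).map pvIdOf := by
  unfold pvQueueNames
  rw [get?_foldl_insert]
  have hfun : (fun (a : List (String × String)) =>
      c == ((PySem.Dict.ofList a).get? "name").getD "") =
      (fun q => pvNameOf q == c) := by
    funext a
    unfold pvNameOf
    exact Bool.beq_comm
  rw [hfun]
  cases hf : (PySem.Dict.ofList queues).values.reverse.find? (fun q => pvNameOf q == c) with
  | some a => simp [pvIdOf]
  | none => simp

-- B computes the same "last best index" characterization as A's scan
lemma pvAlt_char (args : List String) (queues : List (String × List (String × String)))
    (hne : args ≠ [])
    (hkeys : ∀ q ∈ (PySem.Dict.ofList queues).values,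
      (PySem.Dict.ofList q).contains "name" = true ∧ (PySem.Dict.ofList q).contains "id" = true) :
    parse_queue_args_alt args queues =
      match pvFindBest (pvQueueNames queues) args args.length with
      | none => (none, none, [])
      | some j =>
          ((pvQueueNames queues).get? (pvCand args j), some (pvCand args j), args.drop j) := by
  unfold parse_queue_args_alt
  simp only [if_neg hne]
  have hP : ∀ c, ((pvPrefixes args).2).get? c =
      (pvLastIdx args args.length c).map (fun i => (i : Int)) := by
    rw [pvPrefixes_eq]
    exact fun c => pvDn_get? args args.length c
  have hscan : pvBestScan (pvPrefixes args).2 queues =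
      (PySem.Dict.ofList queues).values.foldl
        (fun st q =>
          match ((pvPrefixes args).2).get? (pvNameOf q) with
          | some i => if st.2.2 ≤ i then (some (pvIdOf q), some (pvNameOf q), i) else st
          | none => st)
        (none, none, 0) := rfl
  rw [hscan, pvBestScan_char args ((pvPrefixes args).2) hP]
  have hpred : ∀ m, ((PySem.Dict.ofList queues).values.any
      (fun q => pvNameOf q == pvCand args m)) =
      (pvQueueNames queues).contains (pvCand args m) := by
    intro m
    rw [contains_pvQueueNames queues _ hkeys]
    unfold pvHasName
    apply any_congr_mem
    intro q hq
    have hsome : ((PySem.Dict.ofList q).get? "name").isSome := by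
      rw [← PySem.Dict.contains_eq_isSome_get?]
      exact (hkeys q hq).1
    rcases Option.isSome_iff_exists.mp hsome with ⟨nm, hnm⟩
    simp [pvNameOf, hnm]
  rw [pvMaxIdx_congr _ _ args.length hpred]
  rw [show pvMaxIdx args.length
      (fun m => (pvQueueNames queues).contains (pvCand args m)) =
      pvFindBest (pvQueueNames queues) args args.length from rfl]
  cases hfb : pvFindBest (pvQueueNames queues) args args.length with
  | none => simp
  | some j =>
      obtain ⟨hj1, hj2, _⟩ := pvMaxIdx_some _ _ _ hfb
      simp [get?_pvQueueNames, PySem.List.slice_from_natCast]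
      omega

-- ===== VERDICT (by name: the statement is the Claim_ definition above) =====
theorem parse_queue_args_spec : Claim_unchanged_parse_queue_args := by
  intro args queues hdom hpre
  unfold Spec_parse_queue_args
  intro hnd
  obtain ⟨hne, hkeys⟩ := hpre
  rw [pvAlt_char args queues hne hkeys]
  unfold parse_queue_args
  simp only [if_neg hne]
  rw [pvScanAsc_eq]
  cases hfb : pvFindBest (pvQueueNames queues) args args.length with
  | none => simp
  | some j =>
      obtain ⟨hj1, hjn, hcj⟩ := pvMaxIdx_some _ _ _ hfb
      by_cases hbe : pvCand args j = ""
      · exfalso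
        have hj : j = 1 := by
          by_contra hj
          exact pvCand_ne_empty args j (by omega) hjn hbe
        subst hj
        rcases args with _ | ⟨a, t⟩
        · exact hne rfl
        · have ha : a = "" := by rw [pvCand_one] at hbe; exact hbe
          apply hnd
          refine ⟨by simp [ha], ?_, ?_⟩
          · rw [hbe] at hcj
            rw [contains_pvQueueNames _ _ hkeys] at hcj
            exact hcj
          · intro i hi h2i
            have hmax := pvMaxIdx_max _ _ _ hfb i (by omega) (by simp at hi ⊢; omega)
            rw [contains_pvQueueNames _ _ hkeys] at hmax
            simpa [pvCand] using hmax
      · simp [hbe, PySem.List.slice_from_natCast]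
theorem parse_queue_args_changed : Claim_changed_parse_queue_args := by
  unfold Claim_changed_parse_queue_args; decide
theorem parse_queue_args_tight : Claim_exact_parse_queue_args := by
  intro args queues hdom hpre hd
  obtain ⟨hne, hkeys⟩ := hpre
  obtain ⟨hhead, hhas, hhigh⟩ := hd
  rcases args with _ | ⟨a, t⟩
  · exact absurd rfl hne
  · have ha : a = "" := by simpa using hhead
    subst ha
    have hc1 : (pvQueueNames queues).contains (pvCand ("" :: t) 1) = true := by
      rw [pvCand_one, contains_pvQueueNames _ _ hkeys]; exact hhas
    have hfb : pvFindBest (pvQueueNames queues) ("" :: t) (("" :: t).length) = some 1 := by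
      unfold pvFindBest
      rw [pvMaxIdx_stable _ 1 (("" :: t).length)
        (by simp)
        (fun m hm1 hm2 => by
          rw [contains_pvQueueNames _ _ hkeys]
          have := hhigh m (by simp at hm2 ⊢; omega) (by omega)
          simpa [pvCand] using this)]
      rw [show (1 : Nat) = 0 + 1 from rfl, pvMaxIdx_succ]
      simp only [Nat.zero_add] at hc1 ⊢
      simp [hc1]
    rw [pvAlt_char ("" :: t) queues hne hkeys]
    unfold parse_queue_args
    simp only [if_neg hne]
    rw [pvScanAsc_eq, hfb]
    simp [pvCand_one]
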